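-- pv_equiv track=rewrite | github.com/shunsuke-toba/kaggle-google-code-golf-2025 | arc_gen_common.py | hollywood_squares
-- ===== SOURCE A (Python) =====
-- def grid(width, height, color=0):
--   return [[color for _ in range(width)] for _ in range(height)]
--
-- def hollywood_squares(minisize=3, b=0, g=5, spacing=3):
--   size = minisize * spacing + 2
--   ingrid = grid(size, size, b)
--   for r in range(size):
--     for c in range(size):
--       line = r % (spacing + 1) == spacing or c % (spacing + 1) == spacing
--       ingrid[r][c] = g if line else b
--   return ingrid
-- ===== SOURCE B (Python) =====
-- def hollywood_squares(minisize=3, b=0, g=5, spacing=3):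
--   size = minisize * spacing + 2
--   step = spacing + 1
--   template = [b] * size
--   for c in range(size):
--     if c % step == spacing:
--       template[c] = g
--   full = [g] * size
--   return [full[:] if r % step == spacing else template[:] for r in range(size)]
-- ===== Notes on version B (the rewrite author's own statement) =====
-- stated objective: alternative
-- what changed: Instead of testing the OR gridline condition for every cell in a nested r,c loop, B precomputes one template row with the gridline columns set, then builds the grid in a single row pass as either an all-g row or a copy of the template.
import Mathlib
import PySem

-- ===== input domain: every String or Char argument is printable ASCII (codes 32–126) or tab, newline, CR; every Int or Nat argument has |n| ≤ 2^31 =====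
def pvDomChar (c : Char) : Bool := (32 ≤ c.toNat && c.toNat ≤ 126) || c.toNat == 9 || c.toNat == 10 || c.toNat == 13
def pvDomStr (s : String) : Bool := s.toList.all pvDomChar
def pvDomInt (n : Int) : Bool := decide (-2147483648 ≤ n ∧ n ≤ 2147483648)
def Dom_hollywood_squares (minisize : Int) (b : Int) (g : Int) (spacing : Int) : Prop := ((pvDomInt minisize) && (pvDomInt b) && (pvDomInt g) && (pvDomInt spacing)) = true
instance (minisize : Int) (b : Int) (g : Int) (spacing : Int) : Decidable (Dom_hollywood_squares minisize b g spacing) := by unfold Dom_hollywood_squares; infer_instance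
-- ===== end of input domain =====

-- B builds the grid row-by-row from a precomputed gridline-column template row instead of
-- testing the OR condition per cell in a nested loop (objective: alternative decomposition).


-- ===== PORT A =====
-- grid(width, height, color)
def pvGridA (width : Int) (height : Int) (color : Int) : List (List Int) :=
  (PySem.List.pyRange 0 height 1).map (fun _ => (PySem.List.pyRange 0 width 1).map (fun _ => color))

def hollywood_squares (minisize : Int) (b : Int) (g : Int) (spacing : Int) : List (List Int) :=
  let size := minisize * spacing + 2
  let ingrid := pvGridA size size b
  (PySem.List.pyRange 0 size 1).foldl (fun ingrid r =>
    (PySem.List.pyRange 0 size 1).foldl (fun ingrid c =>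
      let line := (PySem.Int.mod r (spacing + 1) == spacing) || (PySem.Int.mod c (spacing + 1) == spacing)
      -- ingrid[r][c] = g if line else b
      ingrid.modify r.toNat (fun row => row.set c.toNat (if line then g else b))) ingrid) ingrid

-- ===== PORT B =====
def hollywood_squares_alt (minisize : Int) (b : Int) (g : Int) (spacing : Int) : List (List Int) :=
  let size := minisize * spacing + 2
  let step := spacing + 1
  -- template = [b]*size; for c in range(size): if c % step == spacing: template[c] = g
  let template := (PySem.List.pyRange 0 size 1).foldl
    (fun template c => if PySem.Int.mod c step == spacing then template.set c.toNat g else template)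
    (List.replicate size.toNat b)
  -- full = [g]*size
  let full := List.replicate size.toNat g
  (PySem.List.pyRange 0 size 1).map (fun r => if PySem.Int.mod r step == spacing then full else template)

-- ===== PRECONDITION & SPEC =====
-- Pre_ excludes spacing = -1 with minisize ≤ 1: there size = 2 - minisize ≥ 1, the loops run,
-- and Python A raises ZeroDivisionError on r % (spacing + 1) (B raises there too).
def Pre_hollywood_squares (minisize : Int) (b : Int) (g : Int) (spacing : Int) : Prop :=
  ¬ (spacing = -1 ∧ minisize ≤ 1)
instance (minisize : Int) (b : Int) (g : Int) (spacing : Int) : Decidable (Pre_hollywood_squares minisize b g spacing) := by unfold Pre_hollywood_squares; infer_instance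

def pvWitness_hollywood_squares : Int × Int × Int × Int := (3, 0, 5, 3)

def Spec_hollywood_squares (minisize : Int) (b : Int) (g : Int) (spacing : Int) (out : List (List Int)) : Prop := out = hollywood_squares_alt minisize b g spacing
instance (minisize : Int) (b : Int) (g : Int) (spacing : Int) (out : List (List Int)) : Decidable (Spec_hollywood_squares minisize b g spacing out) := by unfold Spec_hollywood_squares; infer_instance

-- ===== CLAIM (what is proved, stated in full; the proofs are below) =====
def Claim_equal_hollywood_squares : Prop := ∀ (minisize : Int) (b : Int) (g : Int) (spacing : Int), Dom_hollywood_squares minisize b g spacing → Pre_hollywood_squares minisize b g spacing → Spec_hollywood_squares minisize b g spacing (hollywood_squares minisize b g spacing)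

-- ===== LEMMAS AND PROOFS =====

-- (l.modify i f).modify i g = l.modify i (g ∘ f) (stated here since Mathlib has no such lemma)
theorem pv_modify_modify {α : Type} (l : List α) (i : Nat) (f h : α → α) :
    (l.modify i f).modify i h = l.modify i (fun x => h (f x)) := by
  apply List.ext_getElem?
  intro j
  simp only [List.getElem?_modify]
  cases l[j]? with
  | none => simp
  | some a => by_cases hij : i = j <;> simp [hij]

-- a fold of modifications at one fixed index is one modification by the folded function
theorem pv_foldl_modify_fixed {α : Type} (r : Nat) (h : α → List Int → List Int) :
    ∀ (L : List α) (gr : List (List Int)),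
      L.foldl (fun gr c => gr.modify r (h c)) gr
        = gr.modify r (fun row => L.foldl (fun row c => h c row) row) := by
  intro L
  induction L with
  | nil =>
    intro gr
    apply List.ext_getElem?
    intro j
    simp [List.getElem?_modify, ite_self]
  | cons c L ih =>
    intro gr
    simp only [List.foldl_cons]
    rw [ih, pv_modify_modify]

-- getElem? of a fold of conditional sets with an index-determined value
theorem pv_foldl_set_getElem? (Q : Nat → Bool) (v : Nat → Int) :
    ∀ (L : List Nat) (t : List Int) (j : Nat),
      (L.foldl (fun t k => if Q k then t.set k (v k) else t) t)[j]?
        = if j ∈ L ∧ Q j = true ∧ j < t.length then some (v j) else t[j]? := by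
  intro L
  induction L with
  | nil => intro t j; simp
  | cons i L ih =>
    intro t j
    simp only [List.foldl_cons]
    rw [ih]
    by_cases hQi : Q i = true <;>
      by_cases hij : i = j <;>
      by_cases hmem : j ∈ L <;>
      by_cases hQj : Q j = true <;>
      by_cases hlt : j < t.length <;>
      simp_all [List.length_set] <;> omega

-- getElem? of a fold of modifications at pairwise distinct indices
theorem pv_foldl_modify_getElem? (F : Nat → List Int → List Int) :
    ∀ (L : List Nat), L.Nodup → ∀ (t : List (List Int)) (j : Nat),
      (L.foldl (fun t k => t.modify k (F k)) t)[j]?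
        = if j ∈ L then (t[j]?).map (F j) else t[j]? := by
  intro L
  induction L with
  | nil => intro _ t j; simp
  | cons i L ih =>
    intro hnd t j
    simp only [List.foldl_cons]
    rw [ih (List.nodup_cons.mp hnd).2]
    have hi : i ∉ L := (List.nodup_cons.mp hnd).1
    by_cases hij : i = j
    · subst hij
      simp [hi]
    · have hji : ¬ j = i := fun h => hij h.symm
      simp [hij, hji]

-- getElem? of a fold of unconditional sets with an index-determined value
theorem pv_foldl_set_all_getElem? (v : Nat → Int) (L : List Nat) (t : List Int) (j : Nat) :
    (L.foldl (fun t k => t.set k (v k)) t)[j]?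
      = if j ∈ L ∧ j < t.length then some (v j) else t[j]? := by
  have h : (fun (t : List Int) (k : Nat) => t.set k (v k))
      = (fun (t : List Int) (k : Nat) => if (fun _ => true) k then t.set k (v k) else t) := by
    funext t k; simp
  rw [h, pv_foldl_set_getElem? (fun _ => true) v L t j]
  simp

theorem hollywood_squares_spec : Claim_equal_hollywood_squares := by
  intro minisize b g spacing _ _
  unfold Spec_hollywood_squares hollywood_squares hollywood_squares_alt pvGridA
  simp only [PySem.List.pyRange_one, sub_zero, zero_add, List.foldl_map, List.map_map,
    Function.comp_def, Int.toNat_natCast]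
  simp only [pv_foldl_modify_fixed]
  apply List.ext_getElem?
  intro r
  rw [pv_foldl_modify_getElem? _ (List.range ((minisize * spacing + 2).toNat)) List.nodup_range]
  by_cases hr : r < (minisize * spacing + 2).toNat
  · simp only [List.mem_range, hr, if_true, List.getElem?_map, List.getElem?_range hr,
      Option.map_some]
    congr 1
    apply List.ext_getElem?
    intro c
    rw [pv_foldl_set_all_getElem?]
    by_cases hline : (PySem.Int.mod (r : Int) (spacing + 1) == spacing) = true
    · simp only [hline, Bool.true_or, if_true]
      by_cases hc : c < (minisize * spacing + 2).toNat <;>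
        simp [hc]
    · simp only [hline, Bool.false_or, if_false, Bool.false_eq_true]
      rw [pv_foldl_set_getElem?]
      by_cases hc : c < (minisize * spacing + 2).toNat <;>
        by_cases hlc : (PySem.Int.mod (c : Int) (spacing + 1) == spacing) = true <;>
        simp [hc, hlc]
  · simp [List.mem_range, hr]
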